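-- pv_equiv track=rewrite | github.com/KCHzzz/line-baccarat-bot | main_v2.py | calc_eye_routes
-- ===== SOURCE A (Python) =====
-- def calc_eye_routes(big_road):
--     def get_col_len(col):
--         return len(col)
--     def make_route(start_row):
--         route = []
--         for col in range(1, len(big_road)):
--             left1 = get_col_len(big_road[col-1]) if col-1 < len(big_road) else 0
--             left2 = get_col_len(big_road[col-2]) if col-2 < len(big_road) else 0
--             if start_row < left1 and start_row < left2:
--                 route.append("紅" if left1 == left2 else "藍")
--         return route
--     big_eye = make_route(1)
--     small = make_route(2)
--     cockroach = make_route(3)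
--     return big_eye, small, cockroach
-- ===== SOURCE B (Python) =====
-- def calc_eye_routes(big_road):
--     # One pass builds a (min, color) table; the three roads are filters of it.
--     table = []
--     for col in range(1, len(big_road)):
--         left1 = len(big_road[col - 1])
--         left2 = len(big_road[col - 2])  # col-2 == -1 wraps to the last column, as in A
--         table.append((min(left1, left2), "紅" if left1 == left2 else "藍"))
--     big_eye = [c for m, c in table if 1 < m]
--     small = [c for m, c in table if 2 < m]
--     cockroach = [c for m, c in table if 3 < m]
--     return big_eye, small, cockroach
-- ===== Notes on version B (the rewrite author's own statement) =====
-- stated objective: simpler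
-- what changed: A runs three independent scans over the columns (one per start_row); B makes a single pass building a (min(left1,left2), color) table and obtains all three roads as cheap threshold filters of that table.
import Mathlib
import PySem

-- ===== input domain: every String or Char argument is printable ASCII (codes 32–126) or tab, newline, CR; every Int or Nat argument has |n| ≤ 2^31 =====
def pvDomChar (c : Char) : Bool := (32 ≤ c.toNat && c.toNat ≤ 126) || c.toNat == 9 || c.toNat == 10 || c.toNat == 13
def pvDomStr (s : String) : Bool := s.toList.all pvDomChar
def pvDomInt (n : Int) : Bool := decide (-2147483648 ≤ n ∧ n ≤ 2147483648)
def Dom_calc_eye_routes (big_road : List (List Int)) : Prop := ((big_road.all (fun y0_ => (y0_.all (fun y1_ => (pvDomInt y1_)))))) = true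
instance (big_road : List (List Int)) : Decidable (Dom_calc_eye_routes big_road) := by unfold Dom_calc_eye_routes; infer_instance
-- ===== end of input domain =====

-- B builds one (min,color) table in a single pass and filters it thrice, instead of A's three independent scans (objective: simpler).

-- ===== PORT A =====
-- get_col_len helper of A
def pvGetColLen (col : List Int) : Int := (col.length : Int)

-- make_route helper of A: one guarded scan per start_row
def pvMakeRoute (big_road : List (List Int)) (start_row : Int) : List String :=
  (PySem.List.pyRange 1 (big_road.length : Int) 1).foldl (fun route col =>
    let left1 : Int := if col - 1 < (big_road.length : Int) then pvGetColLen ((PySem.List.pyGet? big_road (col - 1)).getD []) else 0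
    let left2 : Int := if col - 2 < (big_road.length : Int) then pvGetColLen ((PySem.List.pyGet? big_road (col - 2)).getD []) else 0
    if start_row < left1 ∧ start_row < left2 then route ++ [if left1 = left2 then "紅" else "藍"] else route) []

def calc_eye_routes (big_road : List (List Int)) : List String × List String × List String :=
  (pvMakeRoute big_road 1, pvMakeRoute big_road 2, pvMakeRoute big_road 3)

-- ===== PORT B =====
def calc_eye_routes_alt (big_road : List (List Int)) : List String × List String × List String :=
  let table : List (Int × String) := (PySem.List.pyRange 1 (big_road.length : Int) 1).map (fun col =>
    let left1 : Int := ((PySem.List.pyGet? big_road (col - 1)).getD []).length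
    let left2 : Int := ((PySem.List.pyGet? big_road (col - 2)).getD []).length
    (min left1 left2, if left1 = left2 then "紅" else "藍"))
  (table.filterMap (fun p => if 1 < p.1 then some p.2 else none),
   table.filterMap (fun p => if 2 < p.1 then some p.2 else none),
   table.filterMap (fun p => if 3 < p.1 then some p.2 else none))

-- ===== PRECONDITION & SPEC =====
def Spec_calc_eye_routes (big_road : List (List Int)) (out : List String × List String × List String) : Prop := out = calc_eye_routes_alt big_road
instance (big_road : List (List Int)) (out : List String × List String × List String) : Decidable (Spec_calc_eye_routes big_road out) := by unfold Spec_calc_eye_routes; infer_instance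

-- ===== CLAIM (what is proved, stated in full; the proofs are below) =====
def Claim_equal_calc_eye_routes : Prop := ∀ (big_road : List (List Int)), Dom_calc_eye_routes big_road → Spec_calc_eye_routes big_road (calc_eye_routes big_road)

-- ===== LEMMAS AND PROOFS =====

-- A's guarded scan over a list of columns equals filtering B's (min,color) table,
-- provided every visited column index keeps both guards true.
theorem pv_route_eq_filter (big_road : List (List Int)) (s : Int) (L : List Int)
    (hL : ∀ c ∈ L, c - 1 < (big_road.length : Int) ∧ c - 2 < (big_road.length : Int))
    (acc : List String) :
    L.foldl (fun route col =>
      let left1 : Int := if col - 1 < (big_road.length : Int) then pvGetColLen ((PySem.List.pyGet? big_road (col - 1)).getD []) else 0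
      let left2 : Int := if col - 2 < (big_road.length : Int) then pvGetColLen ((PySem.List.pyGet? big_road (col - 2)).getD []) else 0
      if s < left1 ∧ s < left2 then route ++ [if left1 = left2 then "紅" else "藍"] else route) acc
    = acc ++ (L.map (fun col =>
        let left1 : Int := ((PySem.List.pyGet? big_road (col - 1)).getD []).length
        let left2 : Int := ((PySem.List.pyGet? big_road (col - 2)).getD []).length
        ((min left1 left2 : Int), if left1 = left2 then "紅" else "藍"))).filterMap
          (fun p => if s < p.1 then some p.2 else none) := by
  induction L generalizing acc with
  | nil => simp
  | cons c L ih =>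
    have hc := hL c (by simp)
    have hrest : ∀ x ∈ L, x - 1 < (big_road.length : Int) ∧ x - 2 < (big_road.length : Int) :=
      fun x hx => hL x (by simp [hx])
    rw [List.foldl_cons, ih hrest, List.map_cons, List.filterMap_cons]
    simp only [hc.1, hc.2, if_true, pvGetColLen]
    by_cases h : s < min ((((PySem.List.pyGet? big_road (c - 1)).getD []).length : Int))
        ((((PySem.List.pyGet? big_road (c - 2)).getD []).length : Int))
    · rw [if_pos (lt_min_iff.mp h), if_pos h]
      simp
    · rw [if_neg (fun hco => h (lt_min_iff.mpr hco)), if_neg h]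

theorem pv_mem_range_guards (big_road : List (List Int)) :
    ∀ c ∈ PySem.List.pyRange 1 (big_road.length : Int) 1,
      c - 1 < (big_road.length : Int) ∧ c - 2 < (big_road.length : Int) := by
  intro c hc
  rw [PySem.List.mem_pyRange_one] at hc
  omega

theorem pv_make_route_eq (big_road : List (List Int)) (s : Int) :
    pvMakeRoute big_road s
    = ((PySem.List.pyRange 1 (big_road.length : Int) 1).map (fun col =>
        let left1 : Int := ((PySem.List.pyGet? big_road (col - 1)).getD []).length
        let left2 : Int := ((PySem.List.pyGet? big_road (col - 2)).getD []).length
        ((min left1 left2 : Int), if left1 = left2 then "紅" else "藍"))).filterMap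
          (fun p => if s < p.1 then some p.2 else none) := by
  unfold pvMakeRoute
  rw [pv_route_eq_filter big_road s _ (pv_mem_range_guards big_road) []]
  simp

-- ===== VERDICT (by name: the statement is the Claim_ definition above) =====
theorem calc_eye_routes_spec : Claim_equal_calc_eye_routes := by
  intro big_road _
  unfold Spec_calc_eye_routes calc_eye_routes calc_eye_routes_alt
  rw [pv_make_route_eq big_road 1, pv_make_route_eq big_road 2, pv_make_route_eq big_road 3]
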